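-- pv_equiv track=rewrite | github.com/haodehaode378/ai-paper-coach | services/api/app/core/orchestrator.py | _render_chunk_context
-- ===== SOURCE A (Python) =====
-- def _render_chunk_context(chunks: list[dict[str, str]], max_chars: int = 12000) -> str:
--     parts: list[str] = []
--     total = 0
--     for item in chunks:
--         section = str(item.get("section", "")).strip() or "UNKNOWN"
--         content = str(item.get("content", "")).strip()
--         if not content:
--             continue
--         block = f"[{section}]\n{content}\n"
--         if total + len(block) > max_chars:
--             remain = max_chars - total
--             if remain <= 0:
--                 break
--             block = block[:remain]
--         parts.append(block)
--         total += len(block)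
--         if total >= max_chars:
--             break
--     return "\n".join(parts)
-- ===== SOURCE B (Python) =====
-- def _render_chunk_context(chunks, max_chars=12000):
--     # Render each nonempty chunk into a block, concatenate everything,
--     # cut the whole text once at the global character budget, then
--     # re-split the kept prefix at the original block boundaries.
--     blocks = []
--     for item in chunks:
--         section = str(item.get("section", "")).strip() or "UNKNOWN"
--         content = str(item.get("content", "")).strip()
--         if content:
--             blocks.append(f"[{section}]\n{content}\n")
--     kept = "".join(blocks)[: max(max_chars, 0)]
--     pieces = []
--     pos = 0
--     for b in blocks:
--         piece = kept[pos: pos + len(b)]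
--         if not piece:
--             break
--         pieces.append(piece)
--         pos += len(b)
--     return "\n".join(pieces)
-- ===== Notes on version B (the rewrite author's own statement) =====
-- stated objective: alternative
-- what changed: B replaces A's stateful budget loop (running total, per-block truncate/break decisions) with a global-cut algorithm: concatenate all rendered blocks, slice the whole text once at max(max_chars,0), then re-split the kept prefix at the recorded block boundaries, stopping at the first empty piece.
import Mathlib
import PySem

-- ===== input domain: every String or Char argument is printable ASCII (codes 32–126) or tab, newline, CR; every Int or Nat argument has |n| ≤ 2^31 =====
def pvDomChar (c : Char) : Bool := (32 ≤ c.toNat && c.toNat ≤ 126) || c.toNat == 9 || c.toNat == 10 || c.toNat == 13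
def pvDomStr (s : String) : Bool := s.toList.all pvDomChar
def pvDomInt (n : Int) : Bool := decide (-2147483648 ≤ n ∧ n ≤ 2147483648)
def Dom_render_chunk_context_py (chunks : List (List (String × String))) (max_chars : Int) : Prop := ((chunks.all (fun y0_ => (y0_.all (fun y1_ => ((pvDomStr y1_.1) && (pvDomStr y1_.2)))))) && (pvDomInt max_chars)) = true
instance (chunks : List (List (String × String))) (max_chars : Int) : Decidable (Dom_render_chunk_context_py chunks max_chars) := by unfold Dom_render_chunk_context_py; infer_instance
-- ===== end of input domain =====

-- B replaces A's stateful budget loop by a global cut: render all blocks, slice the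
-- concatenation once at max(max_chars,0), re-split at the block boundaries. Return values
-- proved equal (no side effects involved).

-- ===== PORT A =====
-- A's single loop: parts/total accumulator with truncation and two break points.
def renderLoopA (max_chars : Int) : List (List (String × String)) → List String → Int → List String
  | [], parts, _ => parts
  | item :: rest, parts, total =>
    let sec0 := PySem.Str.strip (PySem.Dict.getD (PySem.Dict.mk item) "section" "")
    let sec := if sec0 = "" then "UNKNOWN" else sec0
    let content := PySem.Str.strip (PySem.Dict.getD (PySem.Dict.mk item) "content" "")
    if content = "" then renderLoopA max_chars rest parts total
    else
      let block := "[" ++ sec ++ "]\n" ++ content ++ "\n"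
      if max_chars < total + PySem.Str.len block then
        let remain := max_chars - total
        if remain ≤ 0 then parts
        else
          let block' := PySem.Str.slice block none (some remain)
          let parts' := parts ++ [block']
          let total' := total + PySem.Str.len block'
          if max_chars ≤ total' then parts' else renderLoopA max_chars rest parts' total'
      else
        let parts' := parts ++ [block]
        let total' := total + PySem.Str.len block
        if max_chars ≤ total' then parts' else renderLoopA max_chars rest parts' total'

def render_chunk_context_py (chunks : List (List (String × String))) (max_chars : Int) : String :=
  PySem.Str.join "\n" (renderLoopA max_chars chunks [] 0)

-- ===== PORT B =====
-- Source B pass 1: the loop collecting the rendered blocks of the nonempty chunks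
def blocksB : List (List (String × String)) → List String
  | [] => []
  | item :: rest =>
    let sec0 := PySem.Str.strip (PySem.Dict.getD (PySem.Dict.mk item) "section" "")
    let sec := if sec0 = "" then "UNKNOWN" else sec0
    let content := PySem.Str.strip (PySem.Dict.getD (PySem.Dict.mk item) "content" "")
    if content = "" then blocksB rest
    else ("[" ++ sec ++ "]\n" ++ content ++ "\n") :: blocksB rest

-- Source B pass 2: re-split the globally cut prefix `kept` at the block boundaries
def resplitB (kept : String) : List String → Int → List String
  | [], _ => []
  | b :: bs, pos =>
    let piece := PySem.Str.slice kept (some pos) (some (pos + PySem.Str.len b))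
    if piece = "" then [] else piece :: resplitB kept bs (pos + PySem.Str.len b)

def render_chunk_context_py_alt (chunks : List (List (String × String))) (max_chars : Int) : String :=
  let blocks := blocksB chunks
  let kept := PySem.Str.slice (PySem.Str.join "" blocks) none (some (max max_chars 0))
  PySem.Str.join "\n" (resplitB kept blocks 0)

-- ===== PRECONDITION & SPEC =====
def Spec_render_chunk_context_py (chunks : List (List (String × String))) (max_chars : Int) (out : String) : Prop := out = render_chunk_context_py_alt chunks max_chars
instance (chunks : List (List (String × String))) (max_chars : Int) (out : String) : Decidable (Spec_render_chunk_context_py chunks max_chars out) := by unfold Spec_render_chunk_context_py; infer_instance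

-- ===== CLAIM (what is proved, stated in full; the proofs are below) =====
def Claim_equal_render_chunk_context_py : Prop := ∀ (chunks : List (List (String × String))) (max_chars : Int), Dom_render_chunk_context_py chunks max_chars → Spec_render_chunk_context_py chunks max_chars (render_chunk_context_py chunks max_chars)

-- ===== LEMMAS AND PROOFS =====

theorem len_block_pos (s c : String) : 0 < PySem.Str.len ("[" ++ s ++ "]\n" ++ c ++ "\n") := by
  simp [PySem.Str.len_eq]
  positivity

theorem join_empty_flatten (L : List (List Char)) : PySem.Chars.join [] L = L.flatten := by
  induction L with
  | nil => rfl
  | cons a t ih =>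
    cases t with
    | nil => show List.intercalate [] [a] = _; simp [List.intercalate]
    | cons b u =>
      show List.intercalate [] (a :: b :: u) = _
      have h : List.intercalate ([] : List Char) (a :: b :: u)
          = a ++ List.intercalate [] (b :: u) := by
        simp [List.intercalate, List.intersperse]
      rw [h, show List.intercalate ([] : List Char) (b :: u) = (b :: u).flatten from ih]
      simp

theorem eq_of_toList_eq (s t : String) (h : s.toList = t.toList) : s = t := by
  rw [← String.ofList_toList (s := s), ← String.ofList_toList (s := t), h]

-- loop A never returns past the budget
theorem loopA_of_ge (max_chars : Int) (items : List (List (String × String))) (parts : List String)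
    (total : Int) (h : max_chars ≤ total) : renderLoopA max_chars items parts total = parts := by
  induction items generalizing parts total with
  | nil => simp [renderLoopA]
  | cons item rest ih =>
    rw [renderLoopA]
    by_cases hc : PySem.Str.strip (PySem.Dict.getD (PySem.Dict.mk item) "content" "") = ""
    · rw [if_pos hc]
      exact ih parts total h
    · rw [if_neg hc]
      set blk := "[" ++ (if PySem.Str.strip (PySem.Dict.getD (PySem.Dict.mk item) "section" "") = "" then "UNKNOWN" else PySem.Str.strip (PySem.Dict.getD (PySem.Dict.mk item) "section" "")) ++ "]\n" ++ PySem.Str.strip (PySem.Dict.getD (PySem.Dict.mk item) "content" "") ++ "\n" with hbdef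
      clear_value blk
      have hb : 0 < PySem.Str.len blk := by rw [hbdef]; exact len_block_pos _ _
      rw [if_pos (show max_chars < total + PySem.Str.len blk by omega),
        if_pos (show max_chars - total ≤ 0 by omega)]

-- past the kept prefix every piece is empty, so the re-split loop stops
theorem resplitB_past (kept : String) (bs : List String) (pos : Int)
    (h0 : 0 ≤ pos) (h : (kept.toList.length : Int) ≤ pos) : resplitB kept bs pos = [] := by
  cases bs with
  | nil => rfl
  | cons b t =>
    rw [resplitB]
    have hlen : 0 ≤ PySem.Str.len b := by simp [PySem.Str.len_eq]
    have hp : (PySem.Str.slice kept (some pos) (some (pos + PySem.Str.len b))) = "" := by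
      have h' : (PySem.Str.slice kept (some pos) (some (pos + PySem.Str.len b))).toList = [] := by
        rw [PySem.Str.toList_slice, PySem.Chars.slice_eq_listSlice,
          PySem.List.slice_toNat _ h0 (by omega)]
        rw [List.drop_eq_nil_of_le (by omega)]
        simp
      rw [← String.ofList_toList
        (s := PySem.Str.slice kept (some pos) (some (pos + PySem.Str.len b))), h']
    rw [if_pos hp]

-- main invariant: A's loop from a consumed prefix `pre` equals B's re-split from position |pre|
theorem loopA_eq_resplit (m : Int) (items : List (List (String × String)))
    (parts : List String) (pre : List Char) (kept : String)
    (hk : kept.toList = (pre ++ (List.map String.toList (blocksB items)).flatten).take m.toNat)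
    (hpre : (pre.length : Int) < m) :
    renderLoopA m items parts (pre.length : Int)
      = parts ++ resplitB kept (blocksB items) (pre.length : Int) := by
  induction items generalizing parts pre with
  | nil =>
    rw [renderLoopA, blocksB]
    rw [show resplitB kept [] (pre.length : Int) = [] from rfl]
    simp
  | cons item rest ih =>
    rw [renderLoopA, blocksB]
    by_cases hc : PySem.Str.strip (PySem.Dict.getD (PySem.Dict.mk item) "content" "") = ""
    · rw [if_pos hc, if_pos hc]
      rw [blocksB, if_pos hc] at hk
      exact ih parts pre hk hpre
    · rw [if_neg hc, if_neg hc]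
      rw [blocksB, if_neg hc] at hk
      set blk := "[" ++ (if PySem.Str.strip (PySem.Dict.getD (PySem.Dict.mk item) "section" "") = "" then "UNKNOWN" else PySem.Str.strip (PySem.Dict.getD (PySem.Dict.mk item) "section" "")) ++ "]\n" ++ PySem.Str.strip (PySem.Dict.getD (PySem.Dict.mk item) "content" "") ++ "\n" with hbdef
      have hLpos : 0 < PySem.Str.len blk := by rw [hbdef]; exact len_block_pos _ _
      clear_value blk
      rw [List.map_cons, List.flatten_cons] at hk
      have hlen : PySem.Str.len blk = (blk.toList.length : Int) := PySem.Str.len_eq blk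
      have hL : 0 < blk.toList.length := by rw [hlen] at hLpos; exact_mod_cast hLpos
      have hm0 : 0 ≤ m := le_trans (Int.natCast_nonneg _) (le_of_lt hpre)
      have hmnat : ((m.toNat : Int)) = m := Int.toNat_of_nonneg hm0
      have hplt : pre.length < m.toNat := by omega
      have hkle : (kept.toList.length : Int) ≤ m := by
        rw [hk]
        have := List.length_take_le m.toNat
          (pre ++ (blk.toList ++ (List.map String.toList (blocksB rest)).flatten))
        omega
      -- the current piece of B
      have hpiece : (PySem.Str.slice kept (some (pre.length : Int))
            (some ((pre.length : Int) + PySem.Str.len blk))).toList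
          = (blk.toList ++ (List.map String.toList (blocksB rest)).flatten).take
              (min blk.toList.length (m.toNat - pre.length)) := by
        rw [hlen, PySem.Str.toList_slice, PySem.Chars.slice_eq_listSlice,
          PySem.List.slice_natCast_add, hk]
        rw [List.drop_take, List.drop_left, List.take_take]
      rw [resplitB]
      by_cases h1 : m < (pre.length : Int) + PySem.Str.len blk
      · -- A truncates; B's piece is the truncated block, and the re-split then stops
        have hcut : m.toNat - pre.length < blk.toList.length := by rw [hlen] at h1; omega
        have hpiece' : (PySem.Str.slice kept (some (pre.length : Int))
              (some ((pre.length : Int) + PySem.Str.len blk))).toList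
            = blk.toList.take (m.toNat - pre.length) := by
          rw [hpiece, min_eq_right (by omega), List.take_append_of_le_length (by omega)]
        have hplen : (PySem.Str.slice kept (some (pre.length : Int))
              (some ((pre.length : Int) + PySem.Str.len blk))).toList.length
            = m.toNat - pre.length := by
          rw [hpiece', List.length_take]
          omega
        have hne : ¬ (PySem.Str.slice kept (some (pre.length : Int))
              (some ((pre.length : Int) + PySem.Str.len blk))) = "" := by
          intro he
          rw [he] at hplen
          simp at hplen
          omega
        have hblock' : (PySem.Str.slice blk none (some (m - (pre.length : Int)))).toList
            = blk.toList.take (m.toNat - pre.length) := by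
          rw [PySem.Str.toList_slice, PySem.Chars.slice_eq_listSlice,
            PySem.List.slice_to _ (by omega)]
          congr 1
          omega
        have heqs : PySem.Str.slice blk none (some (m - (pre.length : Int)))
            = PySem.Str.slice kept (some (pre.length : Int))
                (some ((pre.length : Int) + PySem.Str.len blk)) :=
          eq_of_toList_eq _ _ (by rw [hblock', hpiece'])
        have hlen' : PySem.Str.len (PySem.Str.slice blk none (some (m - (pre.length : Int))))
            = m - (pre.length : Int) := by
          rw [PySem.Str.len_eq, hblock', List.length_take]
          omega
        rw [if_neg hne]
        rw [if_pos h1, if_neg (show ¬ m - (pre.length : Int) ≤ 0 by omega)]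
        rw [resplitB_past kept _ _ (by positivity) (by omega)]
        rw [← heqs]
        rw [if_pos (show m ≤ (pre.length : Int)
          + PySem.Str.len (PySem.Str.slice blk none (some (m - (pre.length : Int)))) by
            rw [hlen']; omega)]
      · -- A takes the whole block; B's piece is the whole block
        have hge : blk.toList.length ≤ m.toNat - pre.length := by rw [hlen] at h1; omega
        have hpiece' : (PySem.Str.slice kept (some (pre.length : Int))
              (some ((pre.length : Int) + PySem.Str.len blk))).toList = blk.toList := by
          rw [hpiece, min_eq_left hge, List.take_left]
        have heqb : PySem.Str.slice kept (some (pre.length : Int))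
              (some ((pre.length : Int) + PySem.Str.len blk)) = blk :=
          eq_of_toList_eq _ _ hpiece'
        have hne : ¬ (PySem.Str.slice kept (some (pre.length : Int))
              (some ((pre.length : Int) + PySem.Str.len blk))) = "" := by
          intro he
          rw [he] at hpiece'
          have : blk.toList.length = 0 := by rw [← hpiece']; rfl
          omega
        rw [if_neg hne, if_neg h1, heqb]
        by_cases h2 : m ≤ (pre.length : Int) + PySem.Str.len blk
        · -- exact fill: both stop after this block
          rw [resplitB_past kept _ _ (by omega) (by omega)]
          rw [if_pos h2]
        · -- both continue
          rw [if_neg h2]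
          have hk' : kept.toList
              = ((pre ++ blk.toList)
                  ++ (List.map String.toList (blocksB rest)).flatten).take m.toNat := by
            rw [hk, List.append_assoc]
          have hpre' : (((pre ++ blk.toList).length : Int)) < m := by
            rw [hlen] at h2
            simp only [List.length_append]
            push_cast
            omega
          have hrec := ih (parts ++ [blk]) (pre ++ blk.toList) hk' hpre'
          have hcast : (((pre ++ blk.toList).length : Int))
              = (pre.length : Int) + PySem.Str.len blk := by
            rw [hlen]
            simp only [List.length_append]
            push_cast
            ring
          rw [hcast] at hrec
          rw [hrec, List.append_assoc, List.singleton_append]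

-- ===== VERDICT (by name: the statement is the Claim_ definition above) =====
theorem render_chunk_context_py_spec : Claim_equal_render_chunk_context_py := by
  intro chunks max_chars _
  unfold Spec_render_chunk_context_py render_chunk_context_py render_chunk_context_py_alt
  have hkept : (PySem.Str.slice (PySem.Str.join "" (blocksB chunks)) none
        (some (max max_chars 0))).toList
      = ((List.map String.toList (blocksB chunks)).flatten).take (max max_chars 0).toNat := by
    rw [PySem.Str.toList_slice, PySem.Chars.slice_eq_listSlice,
      PySem.List.slice_to _ (le_max_right _ _), PySem.Str.toList_join]
    rw [show ("" : String).toList = ([] : List Char) from rfl, join_empty_flatten]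
  show PySem.Str.join "\n" (renderLoopA max_chars chunks [] 0)
      = PySem.Str.join "\n" (resplitB
          (PySem.Str.slice (PySem.Str.join "" (blocksB chunks)) none (some (max max_chars 0)))
          (blocksB chunks) 0)
  by_cases h : max_chars ≤ 0
  · rw [loopA_of_ge max_chars chunks [] 0 h]
    rw [resplitB_past _ _ _ (le_refl 0) (by rw [hkept]; simp [max_eq_right h])]
  · have hmax : max max_chars 0 = max_chars := max_eq_left (by omega)
    have hrec := loopA_eq_resplit max_chars chunks []
      ([] : List Char)
      (PySem.Str.slice (PySem.Str.join "" (blocksB chunks)) none (some (max max_chars 0)))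
      (by rw [hkept, hmax]; simp) (by simp; omega)
    simp only [List.length_nil, Nat.cast_zero] at hrec
    rw [hrec, List.nil_append]
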